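-- pv_equiv track=rewrite | github.com/ArchonMegalon/fleet | scripts/materialize_campaign_os_continuity_monitor.py | _front_state
-- ===== SOURCE A (Python) =====
-- from typing import Any, Dict, List
--
-- def _front_state(states: List[str]) -> str:
--     if any(state == "blocked" for state in states):
--         return "blocked"
--     if any(state == "warning" for state in states):
--         return "warning"
--     if any(state == "warming_up" for state in states):
--         return "warming_up"
--     return "healthy"
-- ===== SOURCE B (Python) =====
-- def _front_state(states):
--     rank = {"blocked": 0, "warning": 1, "warming_up": 2}
--     best = 3
--     for s in states:
--         r = rank.get(s, 3)
--         if r < best: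
--             best = r
--     return ["blocked", "warning", "warming_up", "healthy"][best]
-- ===== Notes on version B (the rewrite author's own statement) =====
-- stated objective: alternative
-- what changed: Replaced three sequential any-scans with a single table-driven pass keeping the minimum priority rank, then indexing the result list by that rank.
import Mathlib
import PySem

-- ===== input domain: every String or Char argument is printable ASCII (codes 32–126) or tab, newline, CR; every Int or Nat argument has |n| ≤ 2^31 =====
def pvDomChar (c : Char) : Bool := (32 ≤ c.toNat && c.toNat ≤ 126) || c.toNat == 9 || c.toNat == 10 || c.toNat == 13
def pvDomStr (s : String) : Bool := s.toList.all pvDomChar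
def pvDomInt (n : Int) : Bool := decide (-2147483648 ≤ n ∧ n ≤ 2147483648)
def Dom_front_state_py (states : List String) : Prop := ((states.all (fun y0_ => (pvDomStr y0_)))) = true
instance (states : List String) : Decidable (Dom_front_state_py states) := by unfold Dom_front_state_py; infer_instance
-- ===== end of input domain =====

-- B replaces A's three sequential any-scans by one table-driven pass keeping the minimum priority rank (objective: alternative).

-- ===== PORT A =====
def front_state_py (states : List String) : String :=
  if states.any (fun state => state == "blocked") then "blocked"
  else if states.any (fun state => state == "warning") then "warning"
  else if states.any (fun state => state == "warming_up") then "warming_up"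
  else "healthy"

-- ===== PORT B =====
def front_state_py_alt (states : List String) : String :=
  let rank : PySem.Dict String Int :=
    PySem.Dict.ofList [("blocked", 0), ("warning", 1), ("warming_up", 2)]
  let best : Int := states.foldl (fun best s =>
    let r := rank.getD s 3
    if r < best then r else best) 3
  -- the index is always in range (0 ≤ best ≤ 3), so the default "" is never used
  PySem.List.pyGetD ["blocked", "warning", "warming_up", "healthy"] best ""

-- ===== PRECONDITION & SPEC =====
def Spec_front_state_py (states : List String) (out : String) : Prop := out = front_state_py_alt states
instance (states : List String) (out : String) : Decidable (Spec_front_state_py states out) := by unfold Spec_front_state_py; infer_instance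

-- ===== CLAIM (what is proved, stated in full; the proofs are below) =====
def Claim_equal_front_state_py : Prop := ∀ (states : List String), Dom_front_state_py states → Spec_front_state_py states (front_state_py states)

-- ===== LEMMAS AND PROOFS =====

/-- rank of one state as B's dict lookup computes it -/
def pvRnk (s : String) : Int :=
  (PySem.Dict.ofList [("blocked", (0:Int)), ("warning", 1), ("warming_up", 2)]).getD s 3

/-- the minimum rank over a list, as A's nested anys determine it -/
def pvM (states : List String) : Int :=
  if states.any (fun state => state == "blocked") then 0
  else if states.any (fun state => state == "warning") then 1
  else if states.any (fun state => state == "warming_up") then 2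
  else 3

lemma pvRnk_eq (s : String) :
    pvRnk s = if s == "blocked" then 0 else if s == "warning" then 1
              else if s == "warming_up" then 2 else 3 := by
  unfold pvRnk
  split_ifs with h1 h2 h3
  · rw [beq_iff_eq] at h1; subst h1; decide
  · rw [beq_iff_eq] at h2; subst h2; decide
  · rw [beq_iff_eq] at h3; subst h3; decide
  · rw [beq_iff_eq] at h1 h2 h3
    simp [PySem.Dict.ofList, PySem.Dict.getD, PySem.Dict.empty, PySem.Dict.update,
          PySem.Dict.insert, PySem.Dict.get?, PySem.Dict.contains, Ne.symm h1, Ne.symm h2, Ne.symm h3]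

lemma pvM_cons (s : String) (rest : List String) :
    pvM (s :: rest) = min (pvRnk s) (pvM rest) := by
  simp only [pvM, pvRnk_eq, List.any_cons]
  by_cases h1 : s == "blocked" <;> by_cases h2 : s == "warning" <;>
    by_cases h3 : s == "warming_up" <;>
    simp_all <;> split_ifs <;> omega

lemma pvM_le (states : List String) : 0 ≤ pvM states ∧ pvM states ≤ 3 := by
  unfold pvM; split_ifs <;> omega

lemma pvFold_eq (states : List String) : ∀ best : Int, best ≤ 3 →
    states.foldl (fun best s =>
      let r := (PySem.Dict.ofList [("blocked", (0:Int)), ("warning", 1), ("warming_up", 2)]).getD s 3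
      if r < best then r else best) best
      = min best (pvM states) := by
  induction states with
  | nil => intro best h; simp [pvM]; omega
  | cons s rest ih =>
    intro best h
    simp only [List.foldl_cons]
    have hstep : (let r := (PySem.Dict.ofList [("blocked", (0:Int)), ("warning", 1), ("warming_up", 2)]).getD s 3
        if r < best then r else best) = min best (pvRnk s) := by
      simp only [pvRnk]; split_ifs <;> omega
    rw [hstep, ih _ (by have := (pvM_le [s]).1; rw [pvM_cons] at this; simp [pvM] at this; omega),
        pvM_cons]
    omega

-- ===== VERDICT (by name: the statement is the Claim_ definition above) =====
theorem front_state_py_spec : Claim_equal_front_state_py := by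
  intro states _
  unfold Spec_front_state_py
  show front_state_py states =
    PySem.List.pyGetD ["blocked", "warning", "warming_up", "healthy"]
      (states.foldl (fun best s =>
        let r := (PySem.Dict.ofList [("blocked", (0:Int)), ("warning", 1), ("warming_up", 2)]).getD s 3
        if r < best then r else best) 3) ""
  rw [pvFold_eq states 3 le_rfl]
  have h3 := pvM_le states
  unfold front_state_py
  unfold pvM at *
  split_ifs <;> simp_all <;> decide
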